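-- pv_equiv track=rewrite | github.com/Svastikkka/LEETCODE | piles of boxes.py | pilesOfBoxes
-- ===== SOURCE A (Python) =====
-- def pilesOfBoxes(arrOfHeights):
--     arrOfHeights.sort(reverse=True)
--     i = 0
--     step = 0
--     while i < len(arrOfHeights) - 1:
--         if arrOfHeights[i + 1] < arrOfHeights[i]:
--             step += i + 1
--         i += 1
--     return step
-- ===== SOURCE B (Python) =====
-- from itertools import groupby
--
-- def pilesOfBoxes(arrOfHeights):
--     # same in-place descending sort as A (preserves the observable mutation)
--     arrOfHeights.sort(reverse=True)
--     counts = [len(list(g)) for _, g in groupby(arrOfHeights)]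
--     total = 0
--     cum = 0
--     for c in counts[:-1]:
--         cum += c
--         total += cum
--     return total
-- ===== Notes on version B (the rewrite author's own statement) =====
-- stated objective: alternative
-- what changed: Replaces the index-by-index adjacent comparison with a groupby pass: group lengths of the sorted list are accumulated and the running cumulative count is added to the total after every group except the last.
import Mathlib
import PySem

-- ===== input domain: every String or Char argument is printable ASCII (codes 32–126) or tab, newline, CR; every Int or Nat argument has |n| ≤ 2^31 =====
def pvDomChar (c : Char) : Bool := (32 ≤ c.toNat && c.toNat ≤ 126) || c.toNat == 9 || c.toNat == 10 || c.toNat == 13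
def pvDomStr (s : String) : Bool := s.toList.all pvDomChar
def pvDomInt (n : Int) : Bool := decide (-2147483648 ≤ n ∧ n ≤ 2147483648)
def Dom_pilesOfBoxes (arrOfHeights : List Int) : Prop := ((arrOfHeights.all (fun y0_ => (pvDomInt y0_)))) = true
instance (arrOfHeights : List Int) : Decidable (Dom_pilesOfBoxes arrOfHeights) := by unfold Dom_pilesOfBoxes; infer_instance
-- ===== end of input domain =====

-- B replaces A's index-by-index adjacent comparison by a groupby pass (objective: alternative).
-- Both Pythons sort the argument in place (same mutation); the equivalence proved is about the return value.

-- ===== PORT A =====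
-- while i < len(arr) - 1: if arr[i+1] < arr[i]: step += i + 1; i += 1
-- (arr[i] / arr[i+1] are always in range under the loop guard, so List.getD is exact here)
def pilesLoopA (l : List Int) (i : Nat) (step : Int) : Int :=
  if h : i < l.length - 1 then
    pilesLoopA l (i + 1)
      (if l.getD (i + 1) 0 < l.getD i 0 then step + ((i : Int) + 1) else step)
  else step
termination_by l.length - i
decreasing_by omega

def pilesOfBoxes (arrOfHeights : List Int) : Int :=
  pilesLoopA (PySem.List.sorted arrOfHeights (fun x => x) true) 0 0

-- ===== PORT B =====
-- group lengths of the list, as itertools.groupby produces them (cur = current key, c = current run length)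
def pvGo (cur : Int) (c : Int) : List Int → List Int
  | [] => [c]
  | x :: t => if x = cur then pvGo cur (c + 1) t else c :: pvGo x 1 t

def pvGroupLens : List Int → List Int
  | [] => []
  | a :: t => pvGo a 1 t

-- counts[:-1] is dropLast; state (total, cum), 'cum += c; total += cum'
def pilesOfBoxes_alt (arrOfHeights : List Int) : Int :=
  let s := PySem.List.sorted arrOfHeights (fun x => x) true
  let counts := pvGroupLens s
  (counts.dropLast.foldl (fun (p : Int × Int) c => (p.1 + (p.2 + c), p.2 + c)) (0, 0)).1

-- ===== PRECONDITION & SPEC =====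
def Spec_pilesOfBoxes (arrOfHeights : List Int) (out : Int) : Prop := out = pilesOfBoxes_alt arrOfHeights
instance (arrOfHeights : List Int) (out : Int) : Decidable (Spec_pilesOfBoxes arrOfHeights out) := by unfold Spec_pilesOfBoxes; infer_instance

-- ===== CLAIM (what is proved, stated in full; the proofs are below) =====
def Claim_equal_pilesOfBoxes : Prop := ∀ (arrOfHeights : List Int), Dom_pilesOfBoxes arrOfHeights → Spec_pilesOfBoxes arrOfHeights (pilesOfBoxes arrOfHeights)

-- ===== LEMMAS AND PROOFS =====

-- common reference function: sum of (k+p+1) over adjacent positions p where the relation R holds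
def pairsAux (R : Int → Int → Bool) (k : Int) : List Int → Int
  | a :: b :: t => (if R a b then k + 1 else 0) + pairsAux R (k + 1) (b :: t)
  | _ => 0

theorem pilesLoopA_eq (fuel : Nat) : ∀ (l : List Int) (i : Nat) (step : Int),
    l.length - i ≤ fuel →
    pilesLoopA l i step = step + pairsAux (fun a b => decide (b < a)) (i : Int) (l.drop i) := by
  induction fuel with
  | zero =>
    intro l i step h
    rw [pilesLoopA]
    have hi : ¬ i < l.length - 1 := by omega
    simp only [hi, dite_false]
    rcases hd : l.drop i with _ | ⟨a, t⟩
    · simp [pairsAux]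
    · have h0 : l.length - i = 0 := by omega
      have h1 := List.length_drop (l := l) (i := i)
      rw [hd] at h1
      simp at h1
      omega
  | succ n ih =>
    intro l i step h
    rw [pilesLoopA]
    by_cases hi : i < l.length - 1
    · simp only [hi, dite_true]
      rw [ih l (i + 1) _ (by omega)]
      have h1 : i < l.length := by omega
      have h2 : i + 1 < l.length := by omega
      have hd : l.drop i = l[i] :: l.drop (i + 1) := List.drop_eq_getElem_cons h1
      have hd2 : l.drop (i + 1) = l[i + 1] :: l.drop (i + 2) := List.drop_eq_getElem_cons h2
      rw [hd, hd2, pairsAux]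
      have g1 : l.getD i 0 = l[i] := List.getD_eq_getElem l 0 h1
      have g2 : l.getD (i + 1) 0 = l[i + 1] := List.getD_eq_getElem l 0 h2
      rw [g1, g2, ← hd2]
      by_cases hc : l[i + 1] < l[i] <;> simp [hc] <;> ring
    · simp only [hi, dite_false]
      rcases hd : l.drop i with _ | ⟨a, t⟩
      · simp [pairsAux]
      · have hlen := List.length_drop (l := l) (i := i)
        rw [hd] at hlen
        have : t = [] := by
          cases t with
          | nil => rfl
          | cons b t' => simp at hlen; omega
        subst this; simp [pairsAux]

theorem pvGo_ne_nil : ∀ (t : List Int) (cur c : Int), pvGo cur c t ≠ [] := by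
  intro t
  induction t with
  | nil => intro cur c; simp [pvGo]
  | cons x t' ih =>
    intro cur c
    simp only [pvGo]
    split
    · exact ih cur (c + 1)
    · simp

-- the B-side fold over the group lengths computes pairsAux with the ≠ relation
theorem fold_go_eq : ∀ (t : List Int) (cur c T C : Int),
    ((pvGo cur c t).dropLast.foldl (fun (p : Int × Int) c => (p.1 + (p.2 + c), p.2 + c)) (T, C)).1
      = T + pairsAux (fun a b => decide (b ≠ a)) (C + c - 1) (cur :: t) := by
  intro t
  induction t with
  | nil => intro cur c T C; simp [pvGo, pairsAux]
  | cons x t' ih =>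
    intro cur c T C
    by_cases hx : x = cur
    · subst hx
      simp only [pvGo, if_true]
      rw [ih x (c + 1) T C, pairsAux]
      simp
      ring_nf
    · simp only [pvGo, if_neg hx]
      have hne : pvGo x 1 t' ≠ [] := pvGo_ne_nil t' x 1
      rw [List.dropLast_cons_of_ne_nil hne, List.foldl_cons]
      rw [ih x 1 (T + (C + c)) (C + c), pairsAux]
      have : (decide (x ≠ cur)) = true := by simp [hx]
      rw [this]
      simp
      ring_nf

-- on a descending-sorted list adjacent "strictly less" and "different" coincide
theorem pairsAux_lt_eq_ne : ∀ (l : List Int) (k : Int),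
    l.Pairwise (fun a b => b ≤ a) →
    pairsAux (fun a b => decide (b < a)) k l = pairsAux (fun a b => decide (b ≠ a)) k l := by
  intro l
  induction l with
  | nil => intro k _; rfl
  | cons a t ih =>
    intro k hp
    cases t with
    | nil => rfl
    | cons b t' =>
      rw [pairsAux, pairsAux]
      have hab : b ≤ a := (List.pairwise_cons.mp hp).1 b (by simp)
      have ht : (b :: t').Pairwise (fun a b => b ≤ a) := (List.pairwise_cons.mp hp).2
      rw [ih (k + 1) ht]
      have : decide (b < a) = decide (b ≠ a) := by
        by_cases h : b < a
        · simp [h, ne_of_lt h]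
        · have : b = a := le_antisymm hab (not_lt.mp h)
          simp [this]
      rw [this]

-- ===== VERDICT (by name: the statement is the Claim_ definition above) =====
theorem pilesOfBoxes_spec : Claim_equal_pilesOfBoxes := by
  intro arr _
  unfold Spec_pilesOfBoxes pilesOfBoxes pilesOfBoxes_alt
  set s := PySem.List.sorted arr (fun x => x) true with hs
  have hsorted : s.Pairwise (fun a b => b ≤ a) := PySem.List.sorted_pairwise_rev arr (fun x => x)
  rw [pilesLoopA_eq s.length s 0 0 (by omega)]
  cases hcase : s with
  | nil => simp [pvGroupLens, pairsAux]
  | cons a t =>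
    simp only [pvGroupLens, List.drop_zero]
    rw [fold_go_eq t a 1 0 0]
    rw [hcase] at hsorted
    norm_num [pairsAux_lt_eq_ne (a :: t) 0 hsorted]
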